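-- pv_equiv track=rewrite | github.com/vvrmahendra/DS-AlgoPrac | mathmaticalApplications/sumOfCustomDivisors.py | answer
-- ===== SOURCE A (Python) =====
-- def apSum(a, N, common):
--     n = N//a
--     return common*(n)*(n+1)//2
--
-- def answer(N,k):
--     ans = N*(N+1)//2
--     a = k
--     while True:
--
--         temp = apSum(a,N, k-1)
--         if temp == 0:
--             return ans
--         ans = ans-temp
--         a = a*k
-- ===== SOURCE B (Python) =====
-- def answer(N, k):
--     # sum of each j in 1..N with every factor of k removed, via digit DP:
--     # scan the base-k digits of N most-significant-first, maintaining the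
--     # answer for the numbers up to the digit prefix read so far.
--     if k == 1:
--         return N * (N + 1) // 2
--     tri = lambda n: n * (n + 1) // 2
--     digits = []                      # base-k digits of N, least significant first
--     m = N
--     while m >= 1:
--         m, d = divmod(m, k)
--         digits.append(d)
--     q = 0                            # value of the digit prefix processed so far
--     s = 0                            # sum of 1..q with all factors of k removed
--     for d in reversed(digits):
--         # extending the prefix: the numbers q*k+1 .. q*k+d are new non-multiples,
--         # and each earlier block of k numbers contributes its k-1 non-multiples
--         s += k * (k - 1) * tri(q - 1) + q * tri(k - 1) + d * q * k + tri(d)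
--         q = q * k + d
--     return s
-- ===== Notes on version B (the rewrite author's own statement) =====
-- stated objective: alternative
-- what changed: B replaces A's loop over the power divisors k, k^2, ... of which each subtracts a closed-form AP sum from N*(N+1)//2 by a digit DP: it writes N in base k once and then scans the digits most-significant-first with a Horner recurrence, extending a prefix value q and adding, per digit, the additive block contribution of the new non-multiples of k, so the accumulator always equals the stripped-factor sum for the prefix.
-- intended difference: For N <= -2 with k >= 2, A's closed formula and floor divisions leave a positive remainder value (e.g. 1 at N=-2,k=2) although there are no numbers 1..N to sum; B returns 0, the empty sum, which is the intended value for a non-positive upper bound. — e.g. on answer(-2, 2): A returns 1, B returns 0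
-- outside the precondition, e.g. on answer(5, -2): A returns 27, B returns 0; on answer(3, 0): A raises ZeroDivisionError, B raises ZeroDivisionError
import Mathlib
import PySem

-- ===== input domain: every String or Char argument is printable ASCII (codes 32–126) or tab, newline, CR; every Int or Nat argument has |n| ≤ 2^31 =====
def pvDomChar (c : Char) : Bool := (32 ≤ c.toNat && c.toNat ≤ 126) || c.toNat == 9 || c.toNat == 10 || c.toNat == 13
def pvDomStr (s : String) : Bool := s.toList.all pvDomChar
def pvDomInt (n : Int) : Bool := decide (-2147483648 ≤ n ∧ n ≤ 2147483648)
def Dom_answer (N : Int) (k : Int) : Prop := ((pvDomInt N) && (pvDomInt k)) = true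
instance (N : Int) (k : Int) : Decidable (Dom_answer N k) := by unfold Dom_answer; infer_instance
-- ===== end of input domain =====

-- B replaces A's power-divisor AP-sum subtractions by a digit DP: it writes N in base k and
-- scans the digits most-significant-first, maintaining the stripped-factor sum of the digit
-- prefix by an additive block formula (objective: alternative; same asymptotic cost).

-- ===== PORT A =====
def apSum (a : Int) (N : Int) (common : Int) : Int :=
  let n := PySem.Int.floordiv N a
  PySem.Int.floordiv (common * n * (n + 1)) 2

-- the 'while True' loop of A; fuel 64 suffices on the admitted domain (|N| ≤ 2^31, k ≥ 1)
def answerLoop : Nat → Int → Int → Int → Int → Int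
  | 0, _, _, _, _ => 0
  | fuel + 1, N, k, ans, a =>
    let temp := apSum a N (k - 1)
    if temp = 0 then ans else answerLoop fuel N k (ans - temp) (a * k)

def answer (N : Int) (k : Int) : Int :=
  answerLoop 64 N k (PySem.Int.floordiv (N * (N + 1)) 2) k

-- ===== PORT B =====
-- Source B's 'tri' lambda
def triB (n : Int) : Int := PySem.Int.floordiv (n * (n + 1)) 2

-- Source B's digit loop 'while m >= 1: m, d = divmod(m, k); digits.append(d)'; the extra '2 ≤ k'
-- in the guard only makes the recursion well-founded (B reaches this loop solely with k ≥ 2,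
-- where it holds; it is exact there)
def toDigits (m : Int) (k : Int) : List Int :=
  if h : 1 ≤ m ∧ 2 ≤ k then
    PySem.Int.mod m k :: toDigits (PySem.Int.floordiv m k) k
  else []
termination_by m.toNat
decreasing_by
  obtain ⟨hm, hk⟩ := h
  rw [PySem.Int.floordiv_eq_ediv_of_pos (by omega)]
  have h2 : 0 ≤ m / k := Int.ediv_nonneg (by omega) (by omega)
  have he := Int.mul_ediv_add_emod m k
  have hr0 : 0 ≤ m % k := Int.emod_nonneg m (by omega)
  have h1 : m / k < m := by nlinarith [Int.emod_lt_of_pos m (show (0:Int) < k by omega)]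
  omega

-- Source B's 'for d in reversed(digits)' Horner scan over the state (q, s)
def answer_alt (N : Int) (k : Int) : Int :=
  if k = 1 then PySem.Int.floordiv (N * (N + 1)) 2
  else (((toDigits N k).reverse).foldl
    (fun st d =>
      (st.1 * k + d,
       st.2 + k * (k - 1) * triB (st.1 - 1) + st.1 * triB (k - 1) + d * st.1 * k + triB d))
    (0, 0)).2

-- ===== PRECONDITION & SPEC =====
-- Pre_ restricts to k ≥ 1, the natural domain of a base to strip: k = 0 divides by zero in
-- both programs, k = -1 makes A loop forever on positive N, and for k ≤ -2 A's
-- AP-subtraction values for a negative base are accidental and differ from B's digit sums.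
def Pre_answer (N : Int) (k : Int) : Prop := 1 ≤ k
instance (N : Int) (k : Int) : Decidable (Pre_answer N k) := by unfold Pre_answer; infer_instance
def pvWitness_answer : Int × Int := (10, 3)

-- For N ≤ -2 with k ≥ 2, A's closed formula and floor divisions leave a positive remainder
-- value although there are no numbers 1..N to sum; B returns 0, the empty sum, which is the
-- intended value for a non-positive upper bound.
def D_answer (N : Int) (k : Int) : Prop := N ≤ -2 ∧ 2 ≤ k
instance (N : Int) (k : Int) : Decidable (D_answer N k) := by unfold D_answer; infer_instance

def Spec_answer (N : Int) (k : Int) (out : Int) : Prop := ¬ D_answer N k → out = answer_alt N k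
instance (N : Int) (k : Int) (out : Int) : Decidable (Spec_answer N k out) := by unfold Spec_answer; infer_instance

def pvDiffWitness_answer : Int × Int := (-2, 2)
def pvDiffWitnessOut_answer : Int × Int := (1, 0)

-- ===== CLAIM (what is proved, stated in full; the proofs are below) =====
def Claim_unchanged_answer : Prop := ∀ (N : Int) (k : Int), Dom_answer N k → Pre_answer N k → Spec_answer N k (answer N k)
def Claim_changed_answer : Prop := Dom_answer (pvDiffWitness_answer.1) (pvDiffWitness_answer.2) ∧ Pre_answer (pvDiffWitness_answer.1) (pvDiffWitness_answer.2) ∧ D_answer (pvDiffWitness_answer.1) (pvDiffWitness_answer.2) ∧ answer (pvDiffWitness_answer.1) (pvDiffWitness_answer.2) = pvDiffWitnessOut_answer.1 ∧ answer_alt (pvDiffWitness_answer.1) (pvDiffWitness_answer.2) = pvDiffWitnessOut_answer.2 ∧ pvDiffWitnessOut_answer.1 ≠ pvDiffWitnessOut_answer.2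

-- ===== LEMMAS AND PROOFS =====

lemma fdiv_two_mul (x : Int) : PySem.Int.floordiv (2 * x) 2 = x := by
  rw [PySem.Int.floordiv_eq_ediv_of_pos (by norm_num)]
  exact Int.mul_ediv_cancel_left x (by norm_num)

lemma two_mul_tri (n : Int) : n * (n + 1) = 2 * triB n := by
  obtain ⟨m, hm⟩ := Int.even_mul_succ_self n
  have h2 : n * (n + 1) = 2 * m := by omega
  have h3 : triB n = m := by rw [triB, h2, fdiv_two_mul]
  omega

lemma tri_zero : triB 0 = 0 := by
  have := two_mul_tri 0
  omega

lemma tri_neg_one : triB (-1) = 0 := by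
  have := two_mul_tri (-1)
  omega

lemma tri_succ (m : Int) : triB m = triB (m - 1) + m := by
  have h1 := two_mul_tri m
  have h2 := two_mul_tri (m - 1)
  nlinarith

lemma tri_eq_zero {q : Int} (hq : 0 ≤ q) (h : triB q = 0) : q = 0 := by
  have h1 := two_mul_tri q
  rw [h, mul_zero] at h1
  rcases mul_eq_zero.mp h1 with h2 | h2 <;> omega

lemma apSum_eq (a N c : Int) : apSum a N c = c * triB (PySem.Int.floordiv N a) := by
  simp only [apSum]
  set n := PySem.Int.floordiv N a with hn
  have h2 : n * (n + 1) = 2 * triB n := two_mul_tri n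
  have h3 : c * n * (n + 1) = 2 * (c * triB n) := by
    calc c * n * (n + 1) = c * (n * (n + 1)) := by ring
    _ = c * (2 * triB n) := by rw [h2]
    _ = 2 * (c * triB n) := by ring
  rw [h3, fdiv_two_mul]

-- q-characterisation of ediv for a positive divisor
lemma ediv_eq_of {n k q r : Int} (hk : 0 < k) (h : n = r + k * q) (h0 : 0 ≤ r) (h1 : r < k) :
    n / k = q := by
  rw [h, Int.add_mul_ediv_left _ _ (by omega : k ≠ 0), Int.ediv_eq_zero_of_lt h0 h1, zero_add]

-- SFrom k F m = Σ_{i=0}^{F-1} triB(m/k^i)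
def SFrom (k : Int) : Nat → Int → Int
  | 0, _ => 0
  | F + 1, m => triB m + SFrom k F (m / k)

lemma SFrom_zero (k : Int) : ∀ F : Nat, SFrom k F 0 = 0
  | 0 => rfl
  | F + 1 => by
    simp only [SFrom, tri_zero, Int.zero_ediv, SFrom_zero k F]
    ring

lemma answerLoop_succ (f : Nat) (N k ans a : Int) :
    answerLoop (f + 1) N k ans a =
      (if apSum a N (k - 1) = 0 then ans else answerLoop f N k (ans - apSum a N (k - 1)) (a * k)) := rfl

-- A's loop value in closed form
lemma answerLoop_spec (k : Int) (hk : 2 ≤ k) :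
    ∀ (f : Nat) (N a ans : Int), 0 ≤ N → 0 < a → N < a * k ^ f →
      answerLoop (f + 1) N k ans a = ans - (k - 1) * SFrom k (f + 1) (N / a) := by
  intro f
  induction f with
  | zero =>
    intro N a ans hN ha hlt
    simp only [pow_zero, mul_one] at hlt
    have hz : N / a = 0 := Int.ediv_eq_zero_of_lt hN hlt
    rw [answerLoop_succ, apSum_eq, PySem.Int.floordiv_eq_ediv_of_pos ha, hz, SFrom_zero, tri_zero]
    simp
  | succ f ih =>
    intro N a ans hN ha hlt
    rw [answerLoop_succ, apSum_eq, PySem.Int.floordiv_eq_ediv_of_pos ha]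
    by_cases htemp : (k - 1) * triB (N / a) = 0
    · have hT : triB (N / a) = 0 := by
        rcases mul_eq_zero.mp htemp with h | h
        · omega
        · exact h
      have hq : N / a = 0 := tri_eq_zero (Int.ediv_nonneg hN (by omega)) hT
      rw [if_pos htemp, hq, SFrom_zero]
      ring
    · rw [if_neg htemp]
      have ha' : 0 < a * k := by positivity
      have hlt' : N < (a * k) * k ^ f := by
        have h6 : a * k * k ^ f = a * k ^ (f + 1) := by ring
        omega
      rw [ih N (a * k) (ans - (k - 1) * triB (N / a)) hN ha' hlt']
      have hdd : N / a / k = N / (a * k) := Int.ediv_ediv_of_nonneg (le_of_lt ha)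
      rw [← hdd]
      simp only [SFrom]
      ring

-- the quotient drops below the next power
lemma ediv_lt_pow {k N : Int} (hk : 2 ≤ k) {F : Nat} (hN : 0 ≤ N) (h : N < k ^ (F + 1)) :
    N / k < k ^ F := by
  by_contra hc
  rw [not_lt] at hc
  have he := Int.mul_ediv_add_emod N k
  have hr0 : 0 ≤ N % k := Int.emod_nonneg N (by omega)
  have h1 : k * k ^ F ≤ k * (N / k) := mul_le_mul_of_nonneg_left hc (by omega)
  have h3 : k ^ (F + 1) = k * k ^ F := by rw [pow_succ]; ring
  omega

-- ---- B side: the semantic bridge Σ_{j=1}^{N} (j with all factors of k removed) ----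

-- j with every factor of k divided out
def strip (j : Int) (k : Int) : Int :=
  if h : 2 ≤ k ∧ 1 ≤ j ∧ PySem.Int.mod j k = 0 then strip (PySem.Int.floordiv j k) k else j
termination_by j.toNat
decreasing_by
  obtain ⟨hk, hj, -⟩ := h
  rw [PySem.Int.floordiv_eq_ediv_of_pos (by omega)]
  have h2 : 0 ≤ j / k := Int.ediv_nonneg (by omega) (by omega)
  have he := Int.mul_ediv_add_emod j k
  have hr0 : 0 ≤ j % k := Int.emod_nonneg j (by omega)
  have h1 : j / k < j := by nlinarith [Int.emod_lt_of_pos j (show (0:Int) < k by omega)]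
  omega

lemma strip_eq (j k : Int) :
    strip j k = if 2 ≤ k ∧ 1 ≤ j ∧ PySem.Int.mod j k = 0
                then strip (PySem.Int.floordiv j k) k else j := by
  rw [strip]
  split <;> simp_all

lemma strip_of_not_dvd {j k : Int} (hk : 2 ≤ k) (h : ¬ k ∣ j) : strip j k = j := by
  rw [strip_eq, if_neg]
  rintro ⟨-, -, hm⟩
  exact h ((PySem.Int.mod_eq_zero_iff_dvd j k).mp hm)

lemma strip_of_dvd {j k : Int} (hk : 2 ≤ k) (hj : 1 ≤ j) (h : k ∣ j) :
    strip j k = strip (j / k) k := by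
  rw [strip_eq, if_pos ⟨hk, hj, (PySem.Int.mod_eq_zero_iff_dvd j k).mpr h⟩,
    PySem.Int.floordiv_eq_ediv_of_pos (by omega)]

-- Σ_{j=1}^{N} strip j k
def sumStrip (N : Int) (k : Int) : Int :=
  if h : 1 ≤ N then sumStrip (N - 1) k + strip N k else 0
termination_by N.toNat
decreasing_by omega

lemma sumStrip_nonpos {N : Int} (k : Int) (h : N ≤ 0) : sumStrip N k = 0 := by
  rw [sumStrip, dif_neg (by omega)]

lemma sumStrip_succ {N : Int} (k : Int) (h : 1 ≤ N) :
    sumStrip N k = sumStrip (N - 1) k + strip N k := by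
  rw [sumStrip, dif_pos h]

-- floor-division step facts used by the splitting lemma
lemma ediv_of_not_dvd {n k : Int} (hk : 2 ≤ k) (hn : 0 ≤ n) (h : ¬ k ∣ (n + 1)) :
    (n + 1) / k = n / k := by
  have he := Int.mul_ediv_add_emod n k
  have hr0 : 0 ≤ n % k := Int.emod_nonneg n (by omega)
  have hr1 : n % k < k := Int.emod_lt_of_pos n (by omega)
  by_cases hc : n % k + 1 = k
  · exact absurd ⟨n / k + 1, by rw [mul_add, mul_one]; linarith [he]⟩ h
  · exact ediv_eq_of (q := n / k) (r := n % k + 1) (by omega)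
      (by linarith [he]) (by omega) (by omega)

-- the splitting identity: Σ_{j≤N} strip j = (Σ_{j≤N, k∤j} j) + Σ_{m≤N/k} strip m
lemma sumStrip_split {k : Int} (hk : 2 ≤ k) :
    ∀ (n : Nat), sumStrip (n : Int) k
      = triB n - k * triB ((n : Int) / k) + sumStrip ((n : Int) / k) k := by
  intro n
  induction n with
  | zero =>
    simp only [Nat.cast_zero, Int.zero_ediv]
    rw [sumStrip_nonpos k (by norm_num), tri_zero]
    ring
  | succ n ih =>
    have hn : ((n + 1 : Nat) : Int) = (n : Int) + 1 := by push_cast; ring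
    rw [hn, sumStrip_succ (N := (n : Int) + 1) k (by omega),
      show ((n : Int) + 1 - 1) = (n : Int) by ring, ih]
    by_cases hd : k ∣ ((n : Int) + 1)
    · obtain ⟨m, hm⟩ := hd
      have hm1 : 1 ≤ m := by nlinarith
      have hq1 : ((n : Int) + 1) / k = m := by rw [hm]; exact Int.mul_ediv_cancel_left m (by omega)
      have hq0 : (n : Int) / k = m - 1 :=
        ediv_eq_of (q := m - 1) (r := k - 1) (by omega)
          (by rw [mul_sub, mul_one]; linarith [hm]) (by omega) (by omega)
      rw [strip_of_dvd hk (by omega) ⟨m, hm⟩, hq1, hq0]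
      have hsm : sumStrip m k = sumStrip (m - 1) k + strip m k := sumStrip_succ k (by omega)
      have ht1 : triB ((n : Int) + 1) = triB (n : Int) + ((n : Int) + 1) := by
        have h := tri_succ ((n : Int) + 1)
        rw [show ((n : Int) + 1 - 1) = (n : Int) by ring] at h
        omega
      have ht2 : triB m = triB (m - 1) + m := tri_succ m
      rw [hsm, ht1, ht2]
      have : (n : Int) + 1 = k * m := hm
      ring_nf
      omega
    · have hq : ((n : Int) + 1) / k = (n : Int) / k := ediv_of_not_dvd hk (by positivity) hd
      rw [strip_of_not_dvd hk hd, hq]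
      have ht1 : triB ((n : Int) + 1) = triB (n : Int) + ((n : Int) + 1) := by
        have h := tri_succ ((n : Int) + 1)
        rw [show ((n : Int) + 1 - 1) = (n : Int) by ring] at h
        omega
      omega

-- Int form of the splitting identity
lemma sumStrip_split' {k : Int} (hk : 2 ≤ k) {N : Int} (hN : 0 ≤ N) :
    sumStrip N k = triB N - k * triB (N / k) + sumStrip (N / k) k := by
  obtain ⟨n, rfl⟩ : ∃ n : Nat, N = (n : Int) := ⟨N.toNat, by omega⟩
  exact sumStrip_split hk n

-- the block formula B adds per digit
lemma sumStrip_block {k q d : Int} (hk : 2 ≤ k) (hq : 0 ≤ q) (hd0 : 0 ≤ d) (hd1 : d < k) :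
    sumStrip (q * k + d) k
      = sumStrip q k + (k * (k - 1) * triB (q - 1) + q * triB (k - 1) + d * q * k + triB d) := by
  have hm0 : 0 ≤ q * k + d := by positivity
  have hqd : (q * k + d) / k = q :=
    ediv_eq_of (q := q) (r := d) (by omega) (by ring) hd0 hd1
  rw [sumStrip_split' hk hm0, hqd]
  have e1 := two_mul_tri (q * k + d)
  have e2 := two_mul_tri q
  have e3 := two_mul_tri (q - 1)
  have e4 := two_mul_tri (k - 1)
  have e5 := two_mul_tri d
  have key : 2 * (triB (q * k + d) - k * triB q)
      = 2 * (k * (k - 1) * triB (q - 1) + q * triB (k - 1) + d * q * k + triB d) := by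
    linear_combination -e1 + k * e2 + k * (k - 1) * e3 + q * e4 + e5
  linarith [key]

lemma toDigits_pos {m k : Int} (hm : 1 ≤ m) (hk : 2 ≤ k) :
    toDigits m k = PySem.Int.mod m k :: toDigits (PySem.Int.floordiv m k) k := by
  rw [toDigits, dif_pos ⟨hm, hk⟩]

lemma toDigits_nonpos {m k : Int} (hm : m ≤ 0) : toDigits m k = [] := by
  rw [toDigits, dif_neg (by omega)]

-- B's fold reconstructs m and carries sumStrip m
lemma foldB_spec {k : Int} (hk : 2 ≤ k) :
    ∀ (n : Nat) (m : Int), m.toNat = n → 0 ≤ m →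
      ((toDigits m k).reverse).foldl
        (fun st d =>
          (st.1 * k + d,
           st.2 + k * (k - 1) * triB (st.1 - 1) + st.1 * triB (k - 1) + d * st.1 * k + triB d))
        (0, 0) = (m, sumStrip m k) := by
  intro n
  induction n using Nat.strong_induction_on with
  | _ n ih =>
    intro m hn hm0
    by_cases hm : 1 ≤ m
    · have hkpos : (0:Int) < k := by omega
      have hq0 : 0 ≤ m / k := Int.ediv_nonneg (by omega) (by omega)
      have he := Int.mul_ediv_add_emod m k
      have hr0 : 0 ≤ m % k := Int.emod_nonneg m (by omega)
      have hr1 : m % k < k := Int.emod_lt_of_pos m hkpos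
      have hlt : m / k < m := by nlinarith
      rw [toDigits_pos hm hk, PySem.Int.floordiv_eq_ediv_of_pos hkpos,
        PySem.Int.mod_eq_emod_of_pos hkpos, List.reverse_cons, List.foldl_append,
        ih (m / k).toNat (by omega) (m / k) rfl hq0]
      simp only [List.foldl_cons, List.foldl_nil]
      rw [Prod.mk.injEq]
      have hm' : m / k * k + m % k = m := by rw [mul_comm]; exact he
      refine ⟨hm', ?_⟩
      have hb := sumStrip_block (k := k) (q := m / k) (d := m % k) hk hq0 hr0 hr1
      rw [hm'] at hb
      rw [hb]
      ring
    · rw [toDigits_nonpos (by omega), sumStrip_nonpos k (by omega), show m = (0:Int) by omega]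
      rfl

-- B's sum in closed form: the same expression A's loop reaches
lemma sumStrip_spec {k : Int} (hk : 2 ≤ k) :
    ∀ (F : Nat) (N : Int), 0 ≤ N → N < k ^ F →
      sumStrip N k = triB N - (k - 1) * SFrom k F (N / k) := by
  intro F
  induction F with
  | zero =>
    intro N hN hlt
    simp only [pow_zero] at hlt
    have hN0 : N = 0 := by omega
    subst hN0
    rw [sumStrip_nonpos k (by norm_num), Int.zero_ediv, SFrom_zero, tri_zero]
    ring
  | succ F ih =>
    intro N hN hlt
    have hm0 : 0 ≤ N / k := Int.ediv_nonneg hN (by omega)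
    have hmF : N / k < k ^ F := ediv_lt_pow hk hN hlt
    rw [sumStrip_split' hk hN, ih _ hm0 hmF]
    simp only [SFrom]
    ring

-- the k = 1 case: A returns immediately with the triangular number
lemma answer_one (N : Int) : answer N 1 = PySem.Int.floordiv (N * (N + 1)) 2 := by
  unfold answer
  rw [show (64 : Nat) = 63 + 1 from rfl, answerLoop_succ, apSum_eq]
  norm_num

-- main positive case
lemma answer_eq_alt_of_nonneg (N k : Int) (hk : 2 ≤ k) (hN : 0 ≤ N) (hD : N ≤ 2147483648) :
    answer N k = answer_alt N k := by
  have hk0 : (0:Int) < k := by omega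
  have hpow : N < k * k ^ 63 := by
    have h1 : (2:Int) ^ 63 ≤ k ^ 63 := pow_le_pow_left₀ (by norm_num) (by omega) 63
    have h2 : k * 2 ^ 63 ≤ k * k ^ 63 := mul_le_mul_of_nonneg_left h1 (by omega)
    have h3 : (2:Int) * 2 ^ 63 ≤ k * 2 ^ 63 := mul_le_mul_of_nonneg_right (by omega) (by positivity)
    have h4 : (2147483648:Int) < 2 * 2 ^ 63 := by norm_num
    omega
  have hpow64 : N < k ^ 64 := by
    have h5 : k * k ^ 63 = k ^ 64 := by ring
    omega
  have hA : answer N k = triB N - (k - 1) * SFrom k 64 (N / k) := by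
    unfold answer
    rw [show (64 : Nat) = 63 + 1 from rfl, answerLoop_spec k hk 63 N k _ hN hk0 hpow]
    rfl
  have hB : answer_alt N k = sumStrip N k := by
    unfold answer_alt
    rw [if_neg (by omega), foldB_spec hk N.toNat N rfl hN]
  rw [hA, hB, sumStrip_spec hk 64 N hN hpow64]

-- ===== VERDICT (by name: the statement is the Claim_ definition above) =====
theorem answer_spec : Claim_unchanged_answer := by
  intro N k hDom hPre hD
  have hk1 : 1 ≤ k := hPre
  show answer N k = answer_alt N k
  by_cases hk : k = 1
  · subst hk
    rw [answer_one]
    unfold answer_alt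
    rw [if_pos rfl]
  · have hk2 : 2 ≤ k := by omega
    have hN1 : -1 ≤ N := by
      unfold D_answer at hD
      by_contra h
      exact hD ⟨by omega, hk2⟩
    by_cases hN : N = -1
    · subst hN
      have hfd : (-1 : Int) / k = -1 :=
        ediv_eq_of (r := k - 1) (by omega) (by ring) (by omega) (by omega)
      have hA : answer (-1) k = PySem.Int.floordiv (-1 * (-1 + 1)) 2 := by
        unfold answer
        rw [show (64 : Nat) = 63 + 1 from rfl, answerLoop_succ, apSum_eq,
          PySem.Int.floordiv_eq_ediv_of_pos (by omega : (0:Int) < k), hfd, tri_neg_one, mul_zero,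
          if_pos rfl]
      have hA0 : answer (-1) k = 0 := by
        rw [hA]
        decide
      have hB : answer_alt (-1) k = 0 := by
        unfold answer_alt
        rw [if_neg hk, toDigits_nonpos (by omega)]
        rfl
      rw [hA0, hB]
    · have hN0 : 0 ≤ N := by omega
      have hDom' : N ≤ 2147483648 := by
        simp only [Dom_answer, pvDomInt, Bool.and_eq_true, decide_eq_true_eq] at hDom
        omega
      exact answer_eq_alt_of_nonneg N k hk2 hN0 hDom'

theorem answer_changed : Claim_changed_answer := by
  unfold Claim_changed_answer
  refine ⟨by decide, by decide, by decide, by decide, ?_, by decide⟩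
  show answer_alt (-2) 2 = 0
  unfold answer_alt
  rw [if_neg (by omega), toDigits_nonpos (by omega)]
  rfl
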